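-- pv_equiv track=rewrite | github.com/DermisZabala/SoloPruebas | core/views.py | sort_sources_by_preference
-- ===== SOURCE A (Python) =====
-- def sort_sources_by_preference(sources_dict):
--     """
--     Ordena las fuentes de video dentro de cada idioma según una lista de preferencia.
--     (Esta función no cambia)
--     """
--     server_preference = [
--         "MEGA",
--         "SW",
--         "Vidsrc",
--         "Streamwish",
--         "Filemoon",
--         "Vidhide",
--         "Netu",
--         "Voesx",
--         "Streamtape",
--     ]
--     sorted_dict = {}
--     for lang, sources_list in sources_dict.items():
--         sorted_list = sorted(
--             sources_list,
--             key=lambda x: server_preference.index(x.get('server_name'))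
--                         if x.get('server_name') in server_preference
--                         else len(server_preference)
--         )
--         sorted_dict[lang] = sorted_list
--     return sorted_dict
-- ===== SOURCE B (Python) =====
-- def sort_sources_by_preference(sources_dict):
--     """Distribution instead of sorting: concatenate the rank classes 0..9 in order."""
--     server_preference = [
--         "MEGA",
--         "SW",
--         "Vidsrc",
--         "Streamwish",
--         "Filemoon",
--         "Vidhide",
--         "Netu",
--         "Voesx",
--         "Streamtape",
--     ]
--
--     def rank(src):
--         name = src.get('server_name')
--         return server_preference.index(name) if name in server_preference else len(server_preference)
--
--     result = {}
--     for lang, sources_list in sources_dict.items():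
--         result[lang] = [s for r in range(len(server_preference) + 1)
--                           for s in sources_list if rank(s) == r]
--     return result
-- ===== Notes on version B (the rewrite author's own statement) =====
-- stated objective: alternative
-- what changed: B replaces the per-language stable comparison sort (sorted with a preference-index key) by a distribution over the fixed rank classes: it concatenates, for each rank 0..9 in order, the sources of that rank in original order, which yields exactly the stable sort's output.
import Mathlib
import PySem

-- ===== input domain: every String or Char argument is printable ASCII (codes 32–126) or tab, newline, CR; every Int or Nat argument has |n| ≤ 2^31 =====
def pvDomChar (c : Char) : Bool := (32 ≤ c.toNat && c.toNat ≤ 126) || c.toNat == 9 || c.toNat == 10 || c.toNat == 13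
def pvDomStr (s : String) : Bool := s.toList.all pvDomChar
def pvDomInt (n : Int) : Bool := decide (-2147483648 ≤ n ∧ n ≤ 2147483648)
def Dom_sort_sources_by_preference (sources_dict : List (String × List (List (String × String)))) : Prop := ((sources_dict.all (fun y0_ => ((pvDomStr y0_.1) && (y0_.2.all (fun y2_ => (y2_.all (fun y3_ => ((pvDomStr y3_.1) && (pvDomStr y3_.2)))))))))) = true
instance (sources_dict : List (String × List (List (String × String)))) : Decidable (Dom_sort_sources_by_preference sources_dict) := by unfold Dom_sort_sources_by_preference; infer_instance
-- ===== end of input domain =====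

-- B replaces the per-language stable comparison sort by a single-pass-per-rank distribution:
-- it concatenates the rank classes 0..9 in order (objective: alternative decomposition, same results).

-- ===== PORT A =====
def pvServerPreference : List String :=
  ["MEGA", "SW", "Vidsrc", "Streamwish", "Filemoon", "Vidhide", "Netu", "Voesx", "Streamtape"]

-- the sort key of A's lambda: index in the preference list if present, else len(preference)
def pvKey (x : List (String × String)) : Int :=
  match PySem.Dict.get? (PySem.Dict.mk x) "server_name" with
  | some v =>
      if v ∈ pvServerPreference then
        ((PySem.List.index? pvServerPreference v).getD pvServerPreference.length : Int)
      else (pvServerPreference.length : Int)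
  | none => (pvServerPreference.length : Int)

def sort_sources_by_preference (sources_dict : List (String × List (List (String × String)))) : List (String × List (List (String × String))) :=
  (sources_dict.foldl
    (fun sorted_dict p =>
      PySem.Dict.insert sorted_dict p.1 (PySem.List.sorted p.2 pvKey false))
    PySem.Dict.empty).items

-- ===== PORT B =====
def sort_sources_by_preference_alt (sources_dict : List (String × List (List (String × String)))) : List (String × List (List (String × String))) :=
  (sources_dict.foldl
    (fun result p =>
      PySem.Dict.insert result p.1
        ((PySem.List.pyRange 0 ((pvServerPreference.length : Int) + 1) 1).flatMap
          (fun r => p.2.flatMap (fun s => if pvKey s == r then [s] else []))))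
    PySem.Dict.empty).items

-- ===== PRECONDITION & SPEC =====
def Spec_sort_sources_by_preference (sources_dict : List (String × List (List (String × String)))) (out : List (String × List (List (String × String)))) : Prop := out = sort_sources_by_preference_alt sources_dict
instance (sources_dict : List (String × List (List (String × String)))) (out : List (String × List (List (String × String)))) : Decidable (Spec_sort_sources_by_preference sources_dict out) := by unfold Spec_sort_sources_by_preference; infer_instance

-- ===== CLAIM (what is proved, stated in full; the proofs are below) =====
def Claim_equal_sort_sources_by_preference : Prop := ∀ (sources_dict : List (String × List (List (String × String)))), Dom_sort_sources_by_preference sources_dict → Spec_sort_sources_by_preference sources_dict (sort_sources_by_preference sources_dict)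

-- ===== LEMMAS AND PROOFS =====

theorem pvKey_bound (s : List (String × String)) : 0 ≤ pvKey s ∧ pvKey s < 10 := by
  unfold pvKey
  cases h : PySem.Dict.get? (PySem.Dict.mk s) "server_name" with
  | none => simp [pvServerPreference]
  | some v =>
    by_cases hv : v ∈ pvServerPreference
    · simp only [hv, if_pos]
      cases hi : PySem.List.index? pvServerPreference v with
      | none => simp [pvServerPreference]
      | some k =>
        obtain ⟨hk, _, _⟩ := PySem.List.getElem_of_index?_eq_some hi
        have hlen : pvServerPreference.length = 9 := by decide
        rw [hlen] at hk
        simp only [Option.getD_some]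
        omega
    · simp only [hv, if_false]
      norm_num [pvServerPreference]

theorem insertBy_skip {α : Type} (before : α → α → Bool) (x : α) (l₁ l₂ : List α)
    (h : ∀ y ∈ l₁, before x y = false) :
    PySem.List.insertBy before x (l₁ ++ l₂) = l₁ ++ PySem.List.insertBy before x l₂ := by
  induction l₁ with
  | nil => simp
  | cons y t ih =>
    have hy : before x y = false := h y (by simp)
    simp only [List.cons_append, PySem.List.insertBy, hy]
    simp only [Bool.false_eq_true, if_false]
    exact congrArg (y :: ·) (ih (fun z hz => h z (by simp [hz])))

theorem insertBy_front {α : Type} (before : α → α → Bool) (x : α) (l : List α)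
    (h : ∀ y ∈ l, before x y = true) :
    PySem.List.insertBy before x l = x :: l := by
  cases l with
  | nil => simp [PySem.List.insertBy]
  | cons y t => simp [PySem.List.insertBy, h y (by simp)]

theorem mem_bucket {α : Type} (key : α → Int) (r : Int) (xs : List α) (y : α)
    (h : y ∈ xs.flatMap (fun s => if key s == r then [s] else [])) : key y = r := by
  rw [List.mem_flatMap] at h
  obtain ⟨s, _, hs⟩ := h
  by_cases hk : (key s == r) = true
  · simp only [hk, if_pos, List.mem_singleton] at hs
    subst hs
    exact beq_iff_eq.mp hk
  · simp [hk] at hs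

theorem flatMap_drop_x {α : Type} (key : α → Int) (x : α) (xs : List α) (rs : List Int)
    (h : ∀ r ∈ rs, ¬ key x = r) :
    rs.flatMap (fun r => (xs ++ [x]).flatMap (fun s => if key s == r then [s] else [])) =
    rs.flatMap (fun r => xs.flatMap (fun s => if key s == r then [s] else [])) := by
  induction rs with
  | nil => rfl
  | cons r t ih =>
    have hxr : ¬ key x = r := h r (by simp)
    rw [List.flatMap_cons, List.flatMap_cons, ih (fun r' hr' => h r' (List.mem_cons_of_mem _ hr'))]
    congr 1
    simp [List.flatMap_append, hxr]

theorem ins_classes {α : Type} (key : α → Int) (x : α) (xs : List α) :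
    ∀ rs : List Int, key x ∈ rs → rs.Pairwise (· < ·) →
      PySem.List.insertBy (fun a b => decide (key a < key b)) x
        (rs.flatMap (fun r => xs.flatMap (fun s => if key s == r then [s] else []))) =
      rs.flatMap (fun r => (xs ++ [x]).flatMap (fun s => if key s == r then [s] else [])) := by
  intro rs hmem hp
  induction rs with
  | nil => simp at hmem
  | cons r t ih =>
    obtain ⟨hlt, hpt⟩ := List.pairwise_cons.mp hp
    rw [List.flatMap_cons, List.flatMap_cons]
    by_cases hxr : key x = r
    · -- x belongs to the head bucket: it goes at the end of that bucket
      have h1 : ∀ y ∈ xs.flatMap (fun s => if key s == r then [s] else []),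
          (decide (key x < key y)) = false := by
        intro y hy
        have := mem_bucket key r xs y hy
        simp [this, hxr]
      have h2 : ∀ y ∈ t.flatMap (fun r' => xs.flatMap (fun s => if key s == r' then [s] else [])),
          (decide (key x < key y)) = true := by
        intro y hy
        rw [List.mem_flatMap] at hy
        obtain ⟨r', hr', hy'⟩ := hy
        have := mem_bucket key r' xs y hy'
        simp only [this, hxr, decide_eq_true_eq]
        exact hlt r' hr'
      rw [insertBy_skip _ _ _ _ h1, insertBy_front _ _ _ h2,
        flatMap_drop_x key x xs t (fun r' hr' => by have := hlt r' hr'; omega)]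
      simp [List.flatMap_append, hxr]
    · -- x belongs to a later bucket: skip the head bucket
      have hmt : key x ∈ t := (List.mem_cons.mp hmem).resolve_left hxr
      have h1 : ∀ y ∈ xs.flatMap (fun s => if key s == r then [s] else []),
          (decide (key x < key y)) = false := by
        intro y hy
        have hky := mem_bucket key r xs y hy
        have : r < key x := hlt _ hmt
        simp only [hky, decide_eq_false_iff_not]
        omega
      rw [insertBy_skip _ _ _ _ h1, ih hmt hpt]
      congr 1
      simp [List.flatMap_append, hxr]

theorem sorted_eq_classes {α : Type} (key : α → Int) (rs : List Int)
    (hp : rs.Pairwise (· < ·)) (hmem : ∀ s : α, key s ∈ rs) (xs : List α) :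
    PySem.List.sorted xs key false =
      rs.flatMap (fun r => xs.flatMap (fun s => if key s == r then [s] else [])) := by
  induction xs using List.reverseRecOn with
  | nil =>
    have h0 : PySem.List.sorted ([] : List α) key false = [] := rfl
    rw [h0]
    symm
    rw [List.flatMap_eq_nil_iff]
    intro r _
    simp
  | append_singleton xs x ih =>
    rw [PySem.List.sorted_eq_foldl_insertBy, List.foldl_append, List.foldl_cons, List.foldl_nil,
      ← PySem.List.sorted_eq_foldl_insertBy, ih]
    exact ins_classes key x xs rs (hmem x) hp

theorem per_list (src : List (List (String × String))) :
    PySem.List.sorted src pvKey false =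
      (PySem.List.pyRange 0 ((pvServerPreference.length : Int) + 1) 1).flatMap
        (fun r => src.flatMap (fun s => if pvKey s == r then [s] else [])) := by
  have hr : PySem.List.pyRange 0 ((pvServerPreference.length : Int) + 1) 1 =
      [0, 1, 2, 3, 4, 5, 6, 7, 8, 9] := by decide
  rw [hr]
  apply sorted_eq_classes
  · decide
  · intro s
    have := pvKey_bound s
    have h10 : pvKey s = 0 ∨ pvKey s = 1 ∨ pvKey s = 2 ∨ pvKey s = 3 ∨ pvKey s = 4 ∨
        pvKey s = 5 ∨ pvKey s = 6 ∨ pvKey s = 7 ∨ pvKey s = 8 ∨ pvKey s = 9 := by omega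
    simpa using h10

-- ===== VERDICT (by name: the statement is the Claim_ definition above) =====
theorem sort_sources_by_preference_spec : Claim_equal_sort_sources_by_preference := by
  intro sd hdom
  clear hdom
  unfold Spec_sort_sources_by_preference sort_sources_by_preference sort_sources_by_preference_alt
  suffices h : ∀ acc : PySem.Dict String (List (List (String × String))),
      sd.foldl (fun sorted_dict p =>
        PySem.Dict.insert sorted_dict p.1 (PySem.List.sorted p.2 pvKey false)) acc =
      sd.foldl (fun result p =>
        PySem.Dict.insert result p.1
          ((PySem.List.pyRange 0 ((pvServerPreference.length : Int) + 1) 1).flatMap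
            (fun r => p.2.flatMap (fun s => if pvKey s == r then [s] else [])))) acc by
    rw [h PySem.Dict.empty]
  induction sd with
  | nil => intro acc; rfl
  | cons p t ih =>
    intro acc
    simp only [List.foldl_cons]
    rw [per_list p.2]
    apply ih
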